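-- pv_equiv track=rewrite | github.com/Suntooth/gallifreyan-tools | Stopwatch Gallifreyan/sentence-discs.py | digraph
-- ===== SOURCE A (Python) =====
-- def digraph(word):
--     wordList = list(word)
--     newWord = ""
--     for i in range(len(digraphs)):
--         for j in range(len(wordList)):
--             if wordList[j-1:j+1] == list(digraphs[i]):
--                 wordList[j-1] = ""
--                 wordList[j] = "x"
--
--     for i in range(len(wordList)):
--         newWord += wordList[i]
--
--     return newWord
--
-- digraphs = ["wh","th","ng","ck","qu","sk"]
-- ===== SOURCE B (Python) =====
-- DIGRAPHS = {"wh", "th", "ng", "ck", "qu", "sk"}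
--
-- def digraph(word):
--     out = []
--     i = 0
--     n = len(word)
--     while i < n:
--         if word[i:i+2] in DIGRAPHS:
--             out.append("x")
--             i += 2
--         else:
--             out.append(word[i])
--             i += 1
--     return "".join(out)
-- ===== Notes on version B (the rewrite author's own statement) =====
-- stated objective: faster
-- what changed: A makes six separate passes over a mutable character list (one per digraph, each pass slicing and overwriting in place) and then concatenates; B is a single left-to-right cursor scan that tests the next two characters against a digraph set, emitting the marker and skipping two characters on a match.
import Mathlib
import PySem

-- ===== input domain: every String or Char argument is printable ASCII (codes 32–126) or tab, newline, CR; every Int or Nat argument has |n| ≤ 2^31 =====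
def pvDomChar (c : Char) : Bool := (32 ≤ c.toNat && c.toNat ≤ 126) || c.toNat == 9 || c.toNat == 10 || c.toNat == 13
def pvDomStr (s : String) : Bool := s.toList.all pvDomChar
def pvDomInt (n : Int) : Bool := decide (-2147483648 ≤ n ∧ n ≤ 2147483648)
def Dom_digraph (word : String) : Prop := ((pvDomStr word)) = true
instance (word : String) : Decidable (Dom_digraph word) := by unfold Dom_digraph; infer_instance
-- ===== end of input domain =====

-- B replaces A's six full passes over the mutable character list (one per digraph) by a
-- single left-to-right cursor scan; same return value, B does not mutate its argument
-- (A's mutation is of a local list only, so callers cannot observe a difference).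

-- ===== PORT A =====
def pvDigraphs : List String := ["wh", "th", "ng", "ck", "qu", "sk"]

-- one step of A's inner loop: if wordList[j-1:j+1] == list(digraphs[i]) then mark positions j-1, j
def pvAStep (d : List String) (wl2 : List String) (j : Int) : List String :=
  if PySem.List.slice wl2 (some (j - 1)) (some (j + 1)) = d then
    PySem.List.pySetD (PySem.List.pySetD wl2 (j - 1) "") j "x"
  else wl2

def digraph (word : String) : String :=
  let wordList0 := word.toList.map (fun c => String.ofList [c])   -- list(word)
  let wordList :=
    (PySem.List.pyRange 0 (pvDigraphs.length : Int) 1).foldl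
      (fun wl i =>
        (PySem.List.pyRange 0 (wl.length : Int) 1).foldl
          (pvAStep ((PySem.List.pyGetD pvDigraphs i "").toList.map (fun c => String.ofList [c]))) wl)
      wordList0
  (PySem.List.pyRange 0 (wordList.length : Int) 1).foldl
    (fun s i => s ++ PySem.List.pyGetD wordList i "") ""

-- ===== PORT B =====
def pvDigraphSet : List String := ["wh", "th", "ng", "ck", "qu", "sk"]

-- B's while loop: cursor over the characters, consuming two on a digraph, one otherwise
def pvScan : List Char → List Char
  | a :: b :: rest =>
      if String.ofList [a, b] ∈ pvDigraphSet then 'x' :: pvScan rest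
      else a :: pvScan (b :: rest)
  | [a] => [a]
  | [] => []

def digraph_alt (word : String) : String := String.ofList (pvScan word.toList)

-- ===== PRECONDITION & SPEC =====
def Spec_digraph (word : String) (out : String) : Prop := out = digraph_alt word
instance (word : String) (out : String) : Decidable (Spec_digraph word out) := by unfold Spec_digraph; infer_instance

-- ===== CLAIM (what is proved, stated in full; the proofs are below) =====
def Claim_equal_digraph : Prop := ∀ (word : String), Dom_digraph word → Spec_digraph word (digraph word)

-- ===== LEMMAS AND PROOFS =====

-- recursive form of one of A's digraph passes
def pvPass (s0 s1 : String) : List String → List String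
  | [] => []
  | [a] => [a]
  | a :: b :: rest =>
      if a = s0 ∧ b = s1 then "" :: "x" :: pvPass s0 s1 rest
      else a :: pvPass s0 s1 (b :: rest)

-- simultaneous marking of every digraph pair in S
def pvMark (S : List (Char × Char)) : List Char → List String
  | a :: b :: rest =>
      if (a, b) ∈ S then "" :: "x" :: pvMark S rest
      else String.ofList [a] :: pvMark S (b :: rest)
  | l => l.map (fun c => String.ofList [c])

-- the six digraphs as char pairs, in the order A's passes accumulate them
def pvS6 : List (Char × Char) :=
  [('s','k'), ('q','u'), ('c','k'), ('n','g'), ('t','h'), ('w','h')]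

lemma pvMark_nil_eq (l : List Char) : pvMark [] l = l.map (fun c => String.ofList [c]) := by
  fun_induction pvMark [] l with
  | case1 a b rest h ih => simp at h
  | case2 a b rest h ih => simp [ih]
  | case3 l h => rfl

lemma pvOfList_eq_iff (l : List Char) (s : String) :
    String.ofList l = s ↔ l = s.toList := by
  constructor
  · intro h; have := congrArg String.toList h; simpa using this
  · rintro rfl; exact String.ofList_toList

lemma pvOfList_singleton_inj (a b : Char) : String.ofList [a] = String.ofList [b] ↔ a = b := by
  rw [pvOfList_eq_iff]; simp

lemma pvOfList_singleton_ne_empty (a : Char) : String.ofList [a] ≠ "" := by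
  rw [Ne, pvOfList_eq_iff]; simp

lemma pvPass_cons_not (s0 s1 x : String) (l : List String)
    (h : ∀ z, l.head? = some z → ¬(x = s0 ∧ z = s1)) :
    pvPass s0 s1 (x :: l) = x :: pvPass s0 s1 l := by
  cases l with
  | nil => rfl
  | cons b t =>
      have hb := h b rfl
      simp [pvPass, hb]

lemma pvPass_cons_ne (s0 s1 x : String) (l : List String) (h : x ≠ s0) :
    pvPass s0 s1 (x :: l) = x :: pvPass s0 s1 l :=
  pvPass_cons_not s0 s1 x l (fun _ _ hc => h hc.1)

lemma pvMark_cons_head (S : List (Char × Char)) (b : Char) (r : List Char)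
    (h : ∀ c, (b, c) ∉ S) :
    pvMark S (b :: r) = String.ofList [b] :: pvMark S r := by
  cases r with
  | nil => rfl
  | cons c t => simp [pvMark, h c]

lemma pvMark_head (S : List (Char × Char)) (b : Char) (r : List Char) :
    (pvMark S (b :: r)).head? = some "" ∨ (pvMark S (b :: r)).head? = some (String.ofList [b]) := by
  cases r with
  | nil => right; rfl
  | cons c t =>
      by_cases h : (b, c) ∈ S
      · left; simp [pvMark, h]
      · right; simp [pvMark, h]

lemma pvNe_x (s0 : Char) (hx : s0 ≠ 'x') : ("x" : String) ≠ String.ofList [s0] := by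
  intro h
  have h2 := (pvOfList_eq_iff [s0] "x").mp h.symm
  simp at h2
  exact hx h2

lemma pvPass_mark (s0 s1 : Char) (S : List (Char × Char)) (hx : s0 ≠ 'x')
    (h1 : ∀ p ∈ S, p.1 ≠ s1) (l : List Char) :
    pvPass (String.ofList [s0]) (String.ofList [s1]) (pvMark S l)
      = pvMark ((s0, s1) :: S) l := by
  have hempty : ("" : String) ≠ String.ofList [s0] := (pvOfList_singleton_ne_empty s0).symm
  have hxs := pvNe_x s0 hx
  fun_induction pvMark ((s0, s1) :: S) l with
  | case1 a b rest hmem ih =>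
      by_cases hS : (a, b) ∈ S
      · rw [show pvMark S (a :: b :: rest) = "" :: "x" :: pvMark S rest by simp [pvMark, hS]]
        rw [pvPass_cons_ne _ _ _ _ hempty, pvPass_cons_ne _ _ _ _ hxs, ih]
      · have hab : a = s0 ∧ b = s1 := by
          rcases List.mem_cons.mp hmem with h | h
          · simpa using h
          · exact absurd h hS
        obtain ⟨ha, hbq⟩ := hab
        have hb : ∀ c, (b, c) ∉ S := fun c hc => (h1 _ hc) hbq
        rw [show pvMark S (a :: b :: rest) = String.ofList [a] :: pvMark S (b :: rest) by
              simp [pvMark, hS], pvMark_cons_head S b rest hb]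
        rw [show pvPass (String.ofList [s0]) (String.ofList [s1])
              (String.ofList [a] :: String.ofList [b] :: pvMark S rest)
            = "" :: "x" :: pvPass (String.ofList [s0]) (String.ofList [s1]) (pvMark S rest) by
              simp [pvPass, ha, hbq]]
        rw [ih]
  | case2 a b rest hmem ih =>
      have hS : (a, b) ∉ S := fun h => hmem (List.mem_cons_of_mem _ h)
      rw [show pvMark S (a :: b :: rest) = String.ofList [a] :: pvMark S (b :: rest) by
            simp [pvMark, hS]]
      rw [pvPass_cons_not _ _ _ _ ?_, ih]
      intro z hz hc
      rcases pvMark_head S b rest with hh | hh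
      · rw [hh] at hz
        have hz' : z = "" := by injection hz with h'; exact h'.symm
        rw [hz'] at hc
        exact (pvOfList_singleton_ne_empty s1) hc.2.symm
      · rw [hh] at hz
        have hz' : z = String.ofList [b] := by injection hz with h'; exact h'.symm
        rw [hz'] at hc
        apply hmem
        have ha : a = s0 := (pvOfList_singleton_inj a s0).mp hc.1
        have hbb : b = s1 := (pvOfList_singleton_inj b s1).mp hc.2
        simp [ha, hbb]
  | case3 l h =>
      cases l with
      | nil => rfl
      | cons a t =>
        cases t with
        | nil => rfl
        | cons b r => exact absurd rfl (h a b r)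

lemma pvRange_nil (a b : Int) (h : b ≤ a) : PySem.List.pyRange a b 1 = [] := by
  rw [PySem.List.pyRange_one]
  simp [Int.toNat_eq_zero.mpr (by omega : b - a ≤ 0)]

lemma pvInnerAux (s0 s1 : String) (hx : s0 ≠ "x") (rest : List String) :
    ∀ (P : List String),
      List.foldl (pvAStep [s0, s1]) (P ++ rest)
        (PySem.List.pyRange ((P.length + 1 : Nat) : Int) ((P.length + rest.length : Nat) : Int) 1)
      = P ++ pvPass s0 s1 rest := by
  fun_induction pvPass s0 s1 rest with
  | case1 =>
      intro P
      rw [pvRange_nil _ _ (by simp)]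
      simp
  | case2 a =>
      intro P
      rw [pvRange_nil _ _ (by simp)]
      simp
  | case3 a b t hcond ih =>
      intro P
      rw [PySem.List.pyRange_one_cons (by simp only [List.length_cons]; push_cast; omega)]
      rw [List.foldl_cons]
      have e1 : (((P.length + 1 : Nat) : Int) - 1) = ((P.length : Nat) : Int) := by push_cast; ring
      have e2 : (((P.length + 1 : Nat) : Int) + 1) = ((P.length + 2 : Nat) : Int) := by push_cast; ring
      have hslice : PySem.List.slice (P ++ a :: b :: t) (some (((P.length + 1 : Nat) : Int) - 1))
          (some (((P.length + 1 : Nat) : Int) + 1)) = [a, b] := by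
        rw [e1, e2, PySem.List.slice_natCast]
        rw [show P.length + 2 - P.length = 2 by omega]
        rw [List.drop_left]
        rfl
      have hstep : pvAStep [s0, s1] (P ++ a :: b :: t) ((P.length + 1 : Nat) : Int)
          = P ++ "" :: "x" :: t := by
        unfold pvAStep
        rw [hslice, if_pos (by simp [hcond.1, hcond.2])]
        rw [e1, PySem.List.pySetD_natCast, PySem.List.pySetD_natCast]
        rw [List.set_append, if_neg (by omega)]
        rw [List.set_append, if_neg (by omega)]
        rw [show P.length - P.length = 0 from by omega,
            show P.length + 1 - P.length = 1 from by omega]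
        rfl
      rw [hstep]
      cases t with
      | nil =>
          rw [pvRange_nil _ _ (by simp only [List.length_cons, List.length_nil]; push_cast; omega)]
          simp [pvPass]
      | cons c t' =>
          rw [PySem.List.pyRange_one_cons (by simp only [List.length_cons]; push_cast; omega)]
          rw [List.foldl_cons]
          have hslice2 : PySem.List.slice (P ++ "" :: "x" :: c :: t')
              (some ((((P.length + 1 : Nat) : Int) + 1) - 1))
              (some ((((P.length + 1 : Nat) : Int) + 1) + 1)) = ["x", c] := by
            rw [show ((((P.length + 1 : Nat) : Int) + 1) - 1) = ((P.length + 1 : Nat) : Int) by ring,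
                show ((((P.length + 1 : Nat) : Int) + 1) + 1) = ((P.length + 3 : Nat) : Int) by push_cast; ring,
                PySem.List.slice_natCast,
                show P.length + 3 - (P.length + 1) = 2 by omega,
                show P ++ "" :: "x" :: c :: t' = (P ++ [""]) ++ "x" :: c :: t' by simp,
                show P.length + 1 = (P ++ [""]).length by simp,
                List.drop_left]
            rfl
          have hstep2 : pvAStep [s0, s1] (P ++ "" :: "x" :: c :: t')
              (((P.length + 1 : Nat) : Int) + 1) = P ++ "" :: "x" :: c :: t' := by
            unfold pvAStep
            rw [hslice2, if_neg (by
              intro hxx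
              exact hx (by injection hxx with h1 _; exact h1.symm ▸ rfl))]
          rw [hstep2]
          have := ih (P ++ ["", "x"])
          rw [show (P ++ ["", "x"]) ++ c :: t' = P ++ "" :: "x" :: c :: t' by simp] at this
          rw [show (((P ++ ["", "x"]).length + 1 : Nat) : Int) = (((P.length + 1 : Nat) : Int) + 1) + 1
                by simp only [List.length_cons, List.length_append, List.length_nil]; push_cast; omega,
              show (((P ++ ["", "x"]).length + (c :: t').length : Nat) : Int)
                  = ((P.length + (a :: b :: c :: t').length : Nat) : Int) by simp only [List.length_cons, List.length_append, List.length_nil]; push_cast; omega] at this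
          rw [this]
          simp
  | case4 a b t hcond ih =>
      intro P
      rw [PySem.List.pyRange_one_cons (by simp only [List.length_cons]; push_cast; omega)]
      rw [List.foldl_cons]
      have e1 : (((P.length + 1 : Nat) : Int) - 1) = ((P.length : Nat) : Int) := by push_cast; ring
      have e2 : (((P.length + 1 : Nat) : Int) + 1) = ((P.length + 2 : Nat) : Int) := by push_cast; ring
      have hslice : PySem.List.slice (P ++ a :: b :: t) (some (((P.length + 1 : Nat) : Int) - 1))
          (some (((P.length + 1 : Nat) : Int) + 1)) = [a, b] := by
        rw [e1, e2, PySem.List.slice_natCast]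
        rw [show P.length + 2 - P.length = 2 by omega]
        rw [List.drop_left]
        rfl
      have hstep : pvAStep [s0, s1] (P ++ a :: b :: t) ((P.length + 1 : Nat) : Int)
          = P ++ a :: b :: t := by
        unfold pvAStep
        rw [hslice, if_neg (by
          intro hxx
          injection hxx with u1 u2
          injection u2 with u2 _
          exact hcond ⟨u1, u2⟩)]
      rw [hstep]
      have := ih (P ++ [a])
      rw [show (P ++ [a]) ++ b :: t = P ++ a :: b :: t by simp] at this
      rw [show (((P ++ [a]).length + 1 : Nat) : Int) = ((P.length + 1 : Nat) : Int) + 1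
            by simp only [List.length_cons, List.length_append, List.length_nil]; push_cast; omega,
          show (((P ++ [a]).length + (b :: t).length : Nat) : Int)
              = ((P.length + (a :: b :: t).length : Nat) : Int) by simp only [List.length_cons, List.length_append, List.length_nil]; push_cast; omega] at this
      rw [this]
      simp

lemma pvInnerEq (s0 s1 : String) (hx : s0 ≠ "x") (wl : List String) :
    (PySem.List.pyRange 0 (wl.length : Int) 1).foldl (pvAStep [s0, s1]) wl
      = pvPass s0 s1 wl := by
  cases wl with
  | nil => rw [pvRange_nil _ _ (by simp)]; rfl
  | cons h tl =>
      rw [PySem.List.pyRange_one_cons (by simp only [List.length_cons]; push_cast; omega), List.foldl_cons]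
      have hne : pvAStep [s0, s1] (h :: tl) 0 = h :: tl := by
        unfold pvAStep
        rw [if_neg ?_]
        intro hq
        have hl := congrArg List.length hq
        rw [PySem.List.length_slice] at hl
        simp [PySem.List.clampIdx] at hl
        omega
      rw [hne]
      have := pvInnerAux s0 s1 hx (h :: tl) []
      simp only [List.nil_append, List.length_nil, Nat.zero_add] at this
      rw [show ((0:Int) + 1) = (((1:Nat)) : Int) by norm_num] at *
      convert this using 3

lemma pvMem_iff (a b : Char) : String.ofList [a, b] ∈ pvDigraphSet ↔ (a, b) ∈ pvS6 := by
  simp [pvDigraphSet, pvS6, pvOfList_eq_iff, Prod.ext_iff,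
        show ("wh":String).toList = ['w','h'] from rfl, show ("th":String).toList = ['t','h'] from rfl,
        show ("ng":String).toList = ['n','g'] from rfl, show ("ck":String).toList = ['c','k'] from rfl,
        show ("qu":String).toList = ['q','u'] from rfl, show ("sk":String).toList = ['s','k'] from rfl]
  tauto

lemma pvConcat_mark (l : List Char) :
    ∀ s : String, ((pvMark pvS6 l).foldl (· ++ ·) s).toList = s.toList ++ pvScan l := by
  fun_induction pvScan l with
  | case1 a b rest hmem ih =>
      intro s
      rw [show pvMark pvS6 (a :: b :: rest) = "" :: "x" :: pvMark pvS6 rest by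
            simp [pvMark, (pvMem_iff a b).mp hmem]]
      simp only [List.foldl_cons]
      rw [ih]
      simp
  | case2 a b rest hmem ih =>
      intro s
      rw [show pvMark pvS6 (a :: b :: rest) = String.ofList [a] :: pvMark pvS6 (b :: rest) by
            have hn : (a, b) ∉ pvS6 := fun h => hmem ((pvMem_iff a b).mpr h)
            simp [pvMark, hn]]
      simp only [List.foldl_cons]
      rw [ih]
      simp
  | case3 a => intro s; simp [pvMark]
  | case4 => intro s; simp [pvMark]

-- ===== VERDICT (by name: the statement is the Claim_ definition above) =====

theorem digraph_spec : Claim_equal_digraph := by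
  intro word _
  unfold Spec_digraph digraph digraph_alt
  simp only []
  rw [show (PySem.List.pyRange 0 (pvDigraphs.length : Int) 1) = [0, 1, 2, 3, 4, 5] from rfl]
  simp only [List.foldl_cons, List.foldl_nil]
  rw [show ((PySem.List.pyGetD pvDigraphs 0 "").toList.map (fun c => String.ofList [c]))
        = [String.ofList ['w'], String.ofList ['h']] from rfl,
      show ((PySem.List.pyGetD pvDigraphs 1 "").toList.map (fun c => String.ofList [c]))
        = [String.ofList ['t'], String.ofList ['h']] from rfl,
      show ((PySem.List.pyGetD pvDigraphs 2 "").toList.map (fun c => String.ofList [c]))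
        = [String.ofList ['n'], String.ofList ['g']] from rfl,
      show ((PySem.List.pyGetD pvDigraphs 3 "").toList.map (fun c => String.ofList [c]))
        = [String.ofList ['c'], String.ofList ['k']] from rfl,
      show ((PySem.List.pyGetD pvDigraphs 4 "").toList.map (fun c => String.ofList [c]))
        = [String.ofList ['q'], String.ofList ['u']] from rfl,
      show ((PySem.List.pyGetD pvDigraphs 5 "").toList.map (fun c => String.ofList [c]))
        = [String.ofList ['s'], String.ofList ['k']] from rfl]
  rw [pvInnerEq _ _ (by decide), pvInnerEq _ _ (by decide), pvInnerEq _ _ (by decide),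
      pvInnerEq _ _ (by decide), pvInnerEq _ _ (by decide), pvInnerEq _ _ (by decide)]
  rw [← pvMark_nil_eq]
  rw [pvPass_mark 'w' 'h' [] (by decide) (by decide),
      pvPass_mark 't' 'h' [('w','h')] (by decide) (by decide),
      pvPass_mark 'n' 'g' [('t','h'), ('w','h')] (by decide) (by decide),
      pvPass_mark 'c' 'k' [('n','g'), ('t','h'), ('w','h')] (by decide) (by decide),
      pvPass_mark 'q' 'u' [('c','k'), ('n','g'), ('t','h'), ('w','h')] (by decide) (by decide),
      pvPass_mark 's' 'k' [('q','u'), ('c','k'), ('n','g'), ('t','h'), ('w','h')] (by decide) (by decide)]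
  rw [show (('s','k') :: [('q','u'), ('c','k'), ('n','g'), ('t','h'), ('w','h')]) = pvS6 from rfl]
  rw [PySem.List.foldl_pyRange_zero_pyGetD' (pvMark pvS6 word.toList) "" (· ++ ·) ""]
  have h := pvConcat_mark word.toList ""
  simp only [String.toList_empty, List.nil_append] at h
  calc List.foldl (· ++ ·) "" (pvMark pvS6 word.toList)
      = String.ofList ((List.foldl (· ++ ·) "" (pvMark pvS6 word.toList)).toList) :=
        String.ofList_toList.symm
    _ = String.ofList (pvScan word.toList) := by rw [h]
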